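-- pv_equiv track=rewrite | github.com/wujinzhen/SomeCode | data_struct/数据结构与算法之美/32-BF_and_RK.py | RK2
-- ===== SOURCE A (Python) =====
-- def RK2(max_arr, min_arr):
--     """
--     RK算法，二维矩阵, 降维计算，只能计算数值矩阵，因为在转为字符串之后没办法区分int和str
--     :param max_arr: 主串矩阵
--     :param min_arr: 模式串矩阵
--     :return: 返回模式串在主串总匹配的字符位置元组
--     """
--     def arr2str(arr):
--         """将二位数组转成字符串"""
--         return ''.join([str(i) for item in arr for i in item])
--
--     n_str = arr2str(min_arr)  # 将矩阵的比较转为字符串的比较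
--     min_arr_len, min_arr_len0 = len(min_arr), len(min_arr[0])
--     for i in range(len(max_arr) - min_arr_len + 1):
--         for j in range(len(max_arr[0]) - min_arr_len0 + 1):
--             x_str = arr2str([max_arr[k][j:min_arr_len0 + j] for k in range(i, min_arr_len + i)])
--             if x_str == n_str:
--                 return [i, min_arr_len + i - 1], [j, min_arr_len0 + j - 1]
-- ===== SOURCE B (Python) =====
-- def RK2(max_arr, min_arr):
--     """Rabin-Karp style 2D match on the digit strings: an additive fingerprint
--     (sum of char codes of the window's concatenated digit string) is computed
--     in O(p) per window from per-row prefix sums; the exact string comparison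
--     runs only on fingerprint hits."""
--     p = len(min_arr)
--     q = len(min_arr[0])
--     n_str = ''.join(str(v) for row in min_arr for v in row)
--     target = sum(ord(c) for c in n_str)
--     prefs = []
--     for row in max_arr:
--         acc = 0
--         pr = [0]
--         for v in row:
--             acc += sum(ord(c) for c in str(v))
--             pr.append(acc)
--         prefs.append(pr)
--     N = len(max_arr[0]) if max_arr else 0
--     for i in range(len(max_arr) - p + 1):
--         for j in range(N - q + 1):
--             fp = 0
--             for k in range(i, i + p):
--                 pr = prefs[k]
--                 L = len(pr) - 1
--                 fp += pr[min(j + q, L)] - pr[min(j, L)]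
--             if fp == target:
--                 x = ''.join(str(v) for k in range(i, i + p) for v in max_arr[k][j:j + q])
--                 if x == n_str:
--                     return [i, i + p - 1], [j, j + q - 1]
-- ===== Notes on version B (the rewrite author's own statement) =====
-- stated objective: alternative
-- what changed: B is a Rabin-Karp-style filter-then-verify: it precomputes per-row prefix sums of each cell's digit-string character-code sum, computes each window's additive fingerprint in O(p) from those prefix sums, and runs the exact string comparison only on fingerprint hits, instead of A's building and comparing the full window string for every position.
import Mathlib
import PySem

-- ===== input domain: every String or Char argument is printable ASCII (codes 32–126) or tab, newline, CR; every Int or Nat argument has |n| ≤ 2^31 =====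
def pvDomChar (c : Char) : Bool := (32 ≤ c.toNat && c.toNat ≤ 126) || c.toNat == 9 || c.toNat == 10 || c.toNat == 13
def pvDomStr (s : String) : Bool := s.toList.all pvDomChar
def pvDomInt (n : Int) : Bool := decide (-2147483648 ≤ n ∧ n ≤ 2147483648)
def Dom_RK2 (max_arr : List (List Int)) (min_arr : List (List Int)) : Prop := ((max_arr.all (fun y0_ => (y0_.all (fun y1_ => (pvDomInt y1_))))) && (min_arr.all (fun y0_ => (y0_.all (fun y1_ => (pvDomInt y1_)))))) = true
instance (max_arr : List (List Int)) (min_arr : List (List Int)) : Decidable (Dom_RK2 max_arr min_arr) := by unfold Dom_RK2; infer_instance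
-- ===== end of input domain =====

-- B is a Rabin–Karp-style filter-then-verify: an additive fingerprint of each window's
-- digit string, from per-row prefix sums, gates the exact string comparison (objective:
-- alternative algorithm; return-value equivalence).

-- ===== PORT A =====
-- ''.join([str(i) for item in arr for i in item]) — string carried as its char list (exact)
def pvArr2str (arr : List (List Int)) : List Char :=
  (arr.flatMap (fun item => item.map PySem.Int.toChars)).flatten

def RK2 (max_arr : List (List Int)) (min_arr : List (List Int)) : Option (List Int × List Int) :=
  let n_str := pvArr2str min_arr
  let min_arr_len : Int := min_arr.length
  let min_arr_len0 : Int := (PySem.List.pyGetD min_arr 0 []).length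
  (PySem.List.pyRange 0 ((max_arr.length : Int) - min_arr_len + 1) 1).findSome? (fun i =>
    (PySem.List.pyRange 0 (((PySem.List.pyGetD max_arr 0 []).length : Int) - min_arr_len0 + 1) 1).findSome? (fun j =>
      let x_str := pvArr2str ((PySem.List.pyRange i (min_arr_len + i) 1).map (fun k =>
        PySem.List.slice (PySem.List.pyGetD max_arr k []) (some j) (some (min_arr_len0 + j))))
      if x_str = n_str then some ([i, min_arr_len + i - 1], [j, min_arr_len0 + j - 1]) else none))

-- ===== PORT B =====
-- sum(ord(c) for c in str(v)) — the additive fingerprint of one cell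
def pvCellFp (v : Int) : Int := ((PySem.Int.toChars v).map (fun c => (c.toNat : Int))).sum

-- the per-row prefix-sum list pr ( acc=0; pr=[0]; for v: acc+=fp(v); pr.append(acc) )
def pvPrefRow (row : List Int) : List Int :=
  (row.foldl (fun (acc : Int × List Int) v =>
      (acc.1 + pvCellFp v, acc.2 ++ [acc.1 + pvCellFp v])) (0, [0])).2

def RK2_alt (max_arr : List (List Int)) (min_arr : List (List Int)) : Option (List Int × List Int) :=
  let p : Int := min_arr.length
  let q : Int := (PySem.List.pyGetD min_arr 0 []).length
  let n_str := (min_arr.flatMap (fun row => row.map PySem.Int.toChars)).flatten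
  let target := (n_str.map (fun c => (c.toNat : Int))).sum
  let prefs := max_arr.map pvPrefRow
  let N : Int := if max_arr = [] then 0 else ((PySem.List.pyGetD max_arr 0 []).length : Int)
  (PySem.List.pyRange 0 ((max_arr.length : Int) - p + 1) 1).findSome? (fun i =>
    (PySem.List.pyRange 0 (N - q + 1) 1).findSome? (fun j =>
      let fp := ((PySem.List.pyRange i (i + p) 1).map (fun k =>
        let pr := PySem.List.pyGetD prefs k []
        let L : Int := (pr.length : Int) - 1
        PySem.List.pyGetD pr (min (j + q) L) 0 - PySem.List.pyGetD pr (min j L) 0)).sum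
      if fp = target then
        let x := ((PySem.List.pyRange i (i + p) 1).flatMap (fun k =>
          (PySem.List.slice (PySem.List.pyGetD max_arr k []) (some j) (some (j + q))).map
            PySem.Int.toChars)).flatten
        if x = n_str then some ([i, i + p - 1], [j, j + q - 1]) else none
      else none))

-- ===== PRECONDITION & SPEC =====
-- Pre_ excludes exactly min_arr = [], on which the Python A raises IndexError at min_arr[0].
def Pre_RK2 (max_arr : List (List Int)) (min_arr : List (List Int)) : Prop := min_arr ≠ []
instance (max_arr : List (List Int)) (min_arr : List (List Int)) : Decidable (Pre_RK2 max_arr min_arr) := by unfold Pre_RK2; infer_instance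
def pvWitness_RK2 : List (List Int) × List (List Int) := ([[1, 2], [3, 4]], [[3]])

def Spec_RK2 (max_arr : List (List Int)) (min_arr : List (List Int)) (out : Option (List Int × List Int)) : Prop := out = RK2_alt max_arr min_arr
instance (max_arr : List (List Int)) (min_arr : List (List Int)) (out : Option (List Int × List Int)) : Decidable (Spec_RK2 max_arr min_arr out) := by unfold Spec_RK2; infer_instance

-- ===== CLAIM (what is proved, stated in full; the proofs are below) =====
def Claim_equal_RK2 : Prop := ∀ (max_arr : List (List Int)) (min_arr : List (List Int)), Dom_RK2 max_arr min_arr → Pre_RK2 max_arr min_arr → Spec_RK2 max_arr min_arr (RK2 max_arr min_arr)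

-- ===== LEMMAS AND PROOFS =====

-- sum of the fingerprints of the first c cells
def pvPS (row : List Int) (c : Nat) : Int := ((row.take c).map pvCellFp).sum

theorem pvPS_zero (row : List Int) : pvPS row 0 = 0 := rfl

theorem pvPS_cons_succ (v : Int) (row : List Int) (n : Nat) :
    pvPS (v :: row) (n + 1) = pvCellFp v + pvPS row n := by
  simp [pvPS]

theorem pvPS_clamp (row : List Int) (c : Nat) (h : row.length ≤ c) :
    pvPS row c = pvPS row row.length := by
  simp [pvPS, List.take_of_length_le h, List.take_of_length_le (le_refl row.length)]

theorem pvPS_min (row : List Int) (c : Nat) :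
    pvPS row (min c row.length) = pvPS row c := by
  rcases le_total c row.length with h | h
  · rw [min_eq_left h]
  · rw [min_eq_right h, pvPS_clamp row c h]

-- segment sum between prefix values = fingerprint sum of the slice
theorem pvPS_window (row : List Int) (j q : Nat) :
    pvPS row (j + q) - pvPS row j = (((row.drop j).take q).map pvCellFp).sum := by
  induction row generalizing j with
  | nil => simp [pvPS]
  | cons v row ih =>
    cases j with
    | zero =>
      simp only [pvPS_zero, List.drop_zero, Nat.zero_add, sub_zero]
      rfl
    | succ j' =>
      have hidx : j' + 1 + q = (j' + q) + 1 := by omega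
      rw [hidx, pvPS_cons_succ, pvPS_cons_succ, List.drop_succ_cons]
      have := ih j'
      omega

-- pvPrefRow row = the prefix sums pvPS row 0 .. row.length
theorem pvPrefRow_foldl (row : List Int) (t : Int) (o : List Int) :
    row.foldl (fun (acc : Int × List Int) v =>
        (acc.1 + pvCellFp v, acc.2 ++ [acc.1 + pvCellFp v])) (t, o)
      = (t + pvPS row row.length,
         o ++ (List.range row.length).map (fun c => t + pvPS row (c + 1))) := by
  induction row generalizing t o with
  | nil => simp [pvPS]
  | cons v row ih =>
    simp only [List.foldl_cons]
    rw [ih]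
    simp only [Prod.mk.injEq]
    constructor
    · rw [List.length_cons, pvPS_cons_succ]; ring
    · rw [List.length_cons, List.range_succ_eq_map]
      simp only [List.map_cons, List.map_map, Function.comp_def, Nat.succ_eq_add_one,
        pvPS_cons_succ, pvPS_zero, List.append_assoc, List.cons_append, List.nil_append]
      refine congrArg (o ++ ·) (congrArg₂ List.cons (by ring) ?_)
      exact List.map_congr_left (fun c _ => by ring)

theorem pvPrefRow_eq (row : List Int) :
    pvPrefRow row = (List.range (row.length + 1)).map (fun c => pvPS row c) := by
  simp only [pvPrefRow]
  rw [pvPrefRow_foldl]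
  rw [List.range_succ_eq_map]
  simp [Function.comp_def, Nat.succ_eq_add_one, pvPS_zero]

-- findSome? respects pointwise-equal-on-members functions
theorem pv_findSome?_congr {α β : Type} (l : List α) (f g : α → Option β)
    (h : ∀ x ∈ l, f x = g x) : l.findSome? f = l.findSome? g := by
  induction l with
  | nil => rfl
  | cons a l ih =>
    simp only [List.findSome?_cons, h a (by simp)]
    cases g a with
    | none => exact ih (fun x hx => h x (by simp [hx]))
    | some b => rfl

-- char-code sum of a char list
def pvCharSum (cs : List Char) : Int := (cs.map (fun c => (c.toNat : Int))).sum

theorem pvCharSum_flatten (l : List (List Char)) :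
    pvCharSum l.flatten = (l.map pvCharSum).sum := by
  induction l with
  | nil => rfl
  | cons c l ih => simp [pvCharSum, List.flatten_cons] at *; omega

-- B's prefix lookup with the clamped index = pvPS at the raw index
theorem pv_lookup (row : List Int) (x : Int) (hx : 0 ≤ x) :
    PySem.List.pyGetD (pvPrefRow row) (min x (((pvPrefRow row).length : Int) - 1)) 0
      = pvPS row x.toNat := by
  rw [pvPrefRow_eq]
  have hlen : ((List.range (row.length + 1)).map (fun c => pvPS row c)).length
      = row.length + 1 := by simp
  have h1 : (0:Int) ≤ min x ((((List.range (row.length + 1)).map (fun c => pvPS row c)).length : Int) - 1) := by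
    rw [hlen]; push_cast; omega
  have h2 : min x ((((List.range (row.length + 1)).map (fun c => pvPS row c)).length : Int) - 1)
      < ((((List.range (row.length + 1)).map (fun c => pvPS row c)).length : Nat) : Int) := by
    rw [hlen]; push_cast; omega
  rw [PySem.List.pyGetD_eq_getElem _ _ h1 h2, List.getElem_map, List.getElem_range]
  have h3 : (min x ((((List.range (row.length + 1)).map (fun c => pvPS row c)).length : Int) - 1)).toNat
      = min x.toNat row.length := by rw [hlen]; push_cast; omega
  rw [h3, pvPS_min]

-- one window row: B's prefix-difference fingerprint = char-code sum of A's row-slice string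
theorem pv_seg (row : List Int) (j q : Int) (hj : 0 ≤ j) (hq : 0 ≤ q) :
    PySem.List.pyGetD (pvPrefRow row) (min (j + q) (((pvPrefRow row).length : Int) - 1)) 0
      - PySem.List.pyGetD (pvPrefRow row) (min j (((pvPrefRow row).length : Int) - 1)) 0
    = pvCharSum (((PySem.List.slice row (some j) (some (j + q))).map PySem.Int.toChars).flatten) := by
  have hjq : (0:Int) ≤ j + q := by omega
  rw [pv_lookup row (j + q) hjq, pv_lookup row j hj]
  have h5 : (j + q).toNat = j.toNat + q.toNat := by omega
  rw [h5, pvPS_window, PySem.List.slice_toNat _ hj hjq, h5, Nat.add_sub_cancel_left]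
  rw [pvCharSum_flatten, List.map_map]
  rfl

-- ===== VERDICT (by name: the statement is the Claim_ definition above) =====
theorem RK2_spec : Claim_equal_RK2 := by
  intro max_arr min_arr _hdom hpre
  unfold Spec_RK2
  simp only [RK2, RK2_alt, pvArr2str]
  apply pv_findSome?_congr
  intro i hi
  have hi' := PySem.List.mem_pyRange_one.mp hi
  have hp1 : (1:Int) ≤ (min_arr.length : Int) := by
    have : min_arr.length ≠ 0 := fun h => hpre (List.eq_nil_of_length_eq_zero h)
    omega
  have hmx : max_arr ≠ [] := by
    intro h; subst h; simp at hi'; omega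
  have hN : (if max_arr = [] then (0:Int) else ((PySem.List.pyGetD max_arr 0 []).length : Int))
      = ((PySem.List.pyGetD max_arr 0 []).length : Int) := by simp [hmx]
  rw [hN]
  apply pv_findSome?_congr
  intro j hj
  have hj' := PySem.List.mem_pyRange_one.mp hj
  have hcomm : (min_arr.length : Int) + i = i + (min_arr.length : Int) := by ring
  have hcomm2 : ∀ k : Int, ((PySem.List.pyGetD min_arr 0 []).length : Int) + j = j + ((PySem.List.pyGetD min_arr 0 []).length : Int) := fun _ => by ring
  -- A's window string = B's verification string
  have hx : ((((PySem.List.pyRange i ((min_arr.length : Int) + i) 1).map (fun k =>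
        PySem.List.slice (PySem.List.pyGetD max_arr k []) (some j)
          (some (((PySem.List.pyGetD min_arr 0 []).length : Int) + j)))).flatMap
        (fun item => item.map PySem.Int.toChars)).flatten)
      = (((PySem.List.pyRange i (i + (min_arr.length : Int)) 1).flatMap (fun k =>
        (PySem.List.slice (PySem.List.pyGetD max_arr k []) (some j)
          (some (j + ((PySem.List.pyGetD min_arr 0 []).length : Int)))).map
            PySem.Int.toChars)).flatten) := by
    rw [hcomm, hcomm2 0, List.flatMap_def, List.map_map, List.flatMap_def]
    simp [Function.comp_def]
  simp only [hx]
  set xw := (((PySem.List.pyRange i (i + (min_arr.length : Int)) 1).flatMap (fun k =>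
        (PySem.List.slice (PySem.List.pyGetD max_arr k []) (some j)
          (some (j + ((PySem.List.pyGetD min_arr 0 []).length : Int)))).map
            PySem.Int.toChars)).flatten) with hxw
  set nstr := ((min_arr.flatMap (fun row => row.map PySem.Int.toChars)).flatten) with hnstr
  by_cases hmatch : xw = nstr
  · -- fingerprint hit is forced: fp = charSum xw = charSum nstr = target
    have hfp : ((PySem.List.pyRange i (i + (min_arr.length : Int)) 1).map (fun k =>
          let pr := PySem.List.pyGetD (max_arr.map pvPrefRow) k []
          let L : Int := (pr.length : Int) - 1
          PySem.List.pyGetD pr (min (j + ((PySem.List.pyGetD min_arr 0 []).length : Int)) L) 0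
            - PySem.List.pyGetD pr (min j L) 0)).sum
        = (nstr.map (fun c => (c.toNat : Int))).sum := by
      have hstep : ∀ k ∈ PySem.List.pyRange i (i + (min_arr.length : Int)) 1,
          (let pr := PySem.List.pyGetD (max_arr.map pvPrefRow) k []
           let L : Int := (pr.length : Int) - 1
           PySem.List.pyGetD pr (min (j + ((PySem.List.pyGetD min_arr 0 []).length : Int)) L) 0
             - PySem.List.pyGetD pr (min j L) 0)
          = pvCharSum (((PySem.List.slice (PySem.List.pyGetD max_arr k []) (some j)
              (some (j + ((PySem.List.pyGetD min_arr 0 []).length : Int)))).map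
                PySem.Int.toChars).flatten) := by
        intro k hk
        have hk' := PySem.List.mem_pyRange_one.mp hk
        have hk0 : (0:Int) ≤ k := le_trans hi'.1 hk'.1
        have hkM : k < (max_arr.length : Int) := by omega
        have hkM' : k < ((max_arr.map pvPrefRow).length : Int) := by simpa using hkM
        simp only
        rw [PySem.List.pyGetD_eq_getElem (max_arr.map pvPrefRow) [] hk0 hkM',
            List.getElem_map,
            PySem.List.pyGetD_eq_getElem max_arr [] hk0 hkM]
        exact pv_seg max_arr[k.toNat] j _ hj'.1 (Int.natCast_nonneg _)
      calc ((PySem.List.pyRange i (i + (min_arr.length : Int)) 1).map _).sum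
          = ((PySem.List.pyRange i (i + (min_arr.length : Int)) 1).map (fun k =>
              pvCharSum (((PySem.List.slice (PySem.List.pyGetD max_arr k []) (some j)
                (some (j + ((PySem.List.pyGetD min_arr 0 []).length : Int)))).map
                  PySem.Int.toChars).flatten))).sum := by
            exact congrArg List.sum (List.map_congr_left hstep)
        _ = pvCharSum xw := by
            simp only [hxw, List.flatMap_def, pvCharSum_flatten, List.map_flatten,
              List.map_map, List.sum_flatten, Function.comp_def]
        _ = (nstr.map (fun c => (c.toNat : Int))).sum := by rw [hmatch]; rfl
    simp only [hfp, hmatch]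
    have e1 : (min_arr.length : Int) + i - 1 = i + (min_arr.length : Int) - 1 := by ring
    have e2 : ((PySem.List.pyGetD min_arr 0 []).length : Int) + j - 1
        = j + ((PySem.List.pyGetD min_arr 0 []).length : Int) - 1 := by ring
    rw [e1, e2]
    simp
  · -- miss: A's compare fails; B returns none whatever the fingerprint says
    simp only [if_neg hmatch]
    split <;> rfl
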